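-- pv_equiv track=rewrite | github.com/aberenguerpas/abstract-dataset-pairing | classify.py | checkPrecision
-- ===== SOURCE A (Python) =====
-- def checkPrecision(id, lis):
--     res = []
--
--     for i in [1,3,5]:
--         if id in lis[:i]:
--             res.append(1)
--         else:
--             res.append(0)
--
--     return res
-- ===== SOURCE B (Python) =====
-- def checkPrecision(id, lis):
--     try:
--         pos = lis.index(id, 0, 5)
--     except ValueError:
--         pos = -1
--     return [1 if 0 <= pos < k else 0 for k in (1, 3, 5)]
-- ===== Notes on version B (the rewrite author's own statement) =====
-- stated objective: alternative
-- what changed: Replaces three prefix-membership scans over re-built slices with one bounded first-index lookup in the first five elements followed by three threshold comparisons.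
import Mathlib
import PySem

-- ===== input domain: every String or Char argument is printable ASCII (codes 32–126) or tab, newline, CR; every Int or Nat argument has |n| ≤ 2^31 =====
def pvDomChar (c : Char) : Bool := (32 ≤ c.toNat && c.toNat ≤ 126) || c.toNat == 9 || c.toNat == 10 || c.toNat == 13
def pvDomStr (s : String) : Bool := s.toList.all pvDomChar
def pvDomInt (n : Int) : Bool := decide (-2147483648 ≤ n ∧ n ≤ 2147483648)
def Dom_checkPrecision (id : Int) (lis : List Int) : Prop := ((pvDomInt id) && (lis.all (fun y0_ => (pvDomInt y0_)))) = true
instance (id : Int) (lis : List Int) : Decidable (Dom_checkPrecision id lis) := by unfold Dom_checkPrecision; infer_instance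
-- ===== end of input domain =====

-- B replaces A's three prefix-slice membership scans with one bounded first-index lookup plus threshold comparisons (objective: alternative, same cost).

-- ===== PORT A =====
def checkPrecision (id : Int) (lis : List Int) : List Int :=
  [(1 : Int), 3, 5].foldl
    (fun res i =>
      if id ∈ PySem.List.slice lis none (some i) then res ++ [1] else res ++ [0])
    []

-- ===== PORT B =====
def checkPrecision_alt (id : Int) (lis : List Int) : List Int :=
  -- lis.index(id, 0, 5): first index of id among the first five elements
  let pos : Int := match PySem.List.index? (PySem.List.slice lis none (some 5)) id with
    | some p => (p : Int)
    | none => -1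
  [(1 : Int), 3, 5].map (fun k => if 0 ≤ pos ∧ pos < k then 1 else 0)

-- ===== PRECONDITION & SPEC =====
def Spec_checkPrecision (id : Int) (lis : List Int) (out : List Int) : Prop := out = checkPrecision_alt id lis
instance (id : Int) (lis : List Int) (out : List Int) : Decidable (Spec_checkPrecision id lis out) := by unfold Spec_checkPrecision; infer_instance

-- ===== CLAIM (what is proved, stated in full; the proofs are below) =====
def Claim_equal_checkPrecision : Prop := ∀ (id : Int) (lis : List Int), Dom_checkPrecision id lis → Spec_checkPrecision id lis (checkPrecision id lis)

-- ===== LEMMAS AND PROOFS =====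
lemma mem_take_iff_index? (lis : List Int) (id : Int) (n : Nat) :
    id ∈ lis.take n ↔ ∃ p, PySem.List.index? lis id = some p ∧ p < n := by
  rw [PySem.List.index?_eq_idxOf?]
  induction lis generalizing n with
  | nil => simp
  | cons x xs ih =>
    cases n with
    | zero => simp
    | succ m =>
      rw [List.idxOf?_cons]
      by_cases hx : x = id
      · subst hx; simp
      · simp only [List.take_succ_cons, List.mem_cons, ih, beq_iff_eq, if_neg hx]
        constructor
        · rintro (h | ⟨p, hp, hpm⟩)
          · exact absurd h.symm hx
          · exact ⟨p + 1, by simp [hp], by omega⟩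
        · rintro ⟨q, hq, hqm⟩
          rcases Option.map_eq_some_iff.mp hq with ⟨p, hp, rfl⟩
          exact Or.inr ⟨p, hp, by omega⟩

lemma slice_mem_iff (lis : List Int) (id : Int) (n : Nat) (hn : n ≤ 5) :
    id ∈ PySem.List.slice lis none (some (n : Int)) ↔
      ∃ p, PySem.List.index? (PySem.List.slice lis none (some 5)) id = some p ∧ p < n := by
  have h5 : PySem.List.slice lis none (some 5) = lis.take 5 :=
    PySem.List.slice_to_natCast (b := 5) (xs := lis)
  rw [PySem.List.slice_to_natCast, h5,
    show List.take n lis = (List.take 5 lis).take n by rw [List.take_take, Nat.min_eq_left hn],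
    mem_take_iff_index?]

-- ===== VERDICT (by name: the statement is the Claim_ definition above) =====
theorem checkPrecision_spec : Claim_equal_checkPrecision := by
  intro id lis _
  unfold Spec_checkPrecision checkPrecision checkPrecision_alt
  cases h : PySem.List.index? (PySem.List.slice lis none (some 5)) id with
  | none =>
    have h1 := slice_mem_iff lis id 1 (by omega)
    have h3 := slice_mem_iff lis id 3 (by omega)
    have h5 := slice_mem_iff lis id 5 (by omega)
    rw [h] at h1 h3 h5
    simp only [List.foldl, List.map]
    rw [if_neg, if_neg, if_neg] <;> simp_all
  | some p =>
    have h1 := slice_mem_iff lis id 1 (by omega)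
    have h3 := slice_mem_iff lis id 3 (by omega)
    have h5 := slice_mem_iff lis id 5 (by omega)
    rw [h] at h1 h3 h5
    simp only [List.foldl, List.map]
    by_cases hp1 : p < 1 <;> by_cases hp3 : p < 3 <;> by_cases hp5 : p < 5 <;>
      simp_all
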